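-- pv_equiv track=rewrite | github.com/stevenj/avr-libc3 | devtools/gen-ioheader-atdf.py | emit_enum
-- ===== SOURCE A (Python) =====
-- def sizeFields(data):
--     """ Take a 2 dimensional array and calculate the maximum size each element of each array entry """
--     results = []
--     for row in data:
--         c_count = 0
--         for column in row:
--             if len(results) <= c_count:
--                 results.append(len(column))
--             elif len(column) > results[c_count]:
--                 results[c_count] = len(column)
--             c_count += 1
--     return results
--
-- def emit_enum(data):
--     enum_str = ""
--     padding = sizeFields(data)
--
--     for value in data:
--         enum_str += "    {0:<{1}} = {2:<{3}}, /* {4} */\n".format(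
--             value[0], padding[0], value[1], padding[1], value[2]
--         )
--     return enum_str
-- ===== SOURCE B (Python) =====
-- def emit_enum(data):
--     # Divide-and-conquer: each half yields its two column widths and a renderer
--     # closure; halves combine by max on widths and composition of renderers, and
--     # the whole is rendered once with the final widths.
--     def rec(rows):
--         if not rows:
--             return 0, 0, lambda w0, w1: ""
--         if len(rows) == 1:
--             n, v, c = rows[0][0], rows[0][1], rows[0][2]
--             return len(n), len(v), (
--                 lambda w0, w1: "    {0:<{1}} = {2:<{3}}, /* {4} */\n".format(n, w0, v, w1, c))
--         mid = len(rows) // 2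
--         lw0, lw1, lrend = rec(rows[:mid])
--         rw0, rw1, rrend = rec(rows[mid:])
--         return max(lw0, rw0), max(lw1, rw1), (
--             lambda w0, w1: lrend(w0, w1) + rrend(w0, w1))
--     w0, w1, render = rec(data)
--     return render(w0, w1)
-- ===== Notes on version B (the rewrite author's own statement) =====
-- stated objective: alternative
-- what changed: Replaces A's two staged loops (sizeFields' growing width table scanned over every cell of every row, then a formatting loop accumulating via string +=) by one divide-and-conquer recursion in which each half of the data returns its two column widths together with a renderer closure; halves combine by max and renderer composition, and the result is rendered once with the final widths.
import Mathlib
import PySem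

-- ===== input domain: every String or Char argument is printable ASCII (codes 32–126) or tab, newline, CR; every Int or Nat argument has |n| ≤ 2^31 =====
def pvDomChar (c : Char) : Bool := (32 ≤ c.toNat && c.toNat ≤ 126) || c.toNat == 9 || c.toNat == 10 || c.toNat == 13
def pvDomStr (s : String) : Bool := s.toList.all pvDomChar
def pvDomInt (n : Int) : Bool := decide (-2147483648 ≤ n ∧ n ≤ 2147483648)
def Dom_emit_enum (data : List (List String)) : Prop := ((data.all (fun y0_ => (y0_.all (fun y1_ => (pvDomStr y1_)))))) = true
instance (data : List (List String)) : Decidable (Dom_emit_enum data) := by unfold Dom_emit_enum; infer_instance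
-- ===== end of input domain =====

-- B is an alternative: a divide-and-conquer pass in which each half of the data yields its
-- two column widths and a renderer closure; halves combine by max and renderer composition,
-- replacing A's staged sizeFields width table plus string-+= formatting loop.

-- shared primitive: Python's left-justify ("{:<w}") — pad with spaces, never truncate
def pyLJust (s : String) (w : Int) : String :=
  s ++ String.ofList (List.replicate (w - PySem.Str.len s).toNat ' ')

-- ===== PORT A =====
-- inner 'for column in row' loop of sizeFields, with its results/c_count state
def sizeFieldsInner : List String → List Int → Nat → List Int
  | [], results, _ => results
  | col :: rest, results, c =>
    sizeFieldsInner rest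
      (if results.length ≤ c then results ++ [PySem.Str.len col]
       else if results.getD c 0 < PySem.Str.len col then results.set c (PySem.Str.len col)
       else results)
      (c + 1)

def sizeFields (data : List (List String)) : List Int :=
  data.foldl (fun results row => sizeFieldsInner row results 0) []

-- value[i] / padding[i] are totalised with a default; Pre_emit_enum puts every index in range
def emit_enum (data : List (List String)) : String :=
  let padding := sizeFields data
  data.foldl (fun enum_str value =>
    enum_str ++ ("    " ++ pyLJust ((PySem.List.pyGet? value 0).getD "") (padding.getD 0 0)
      ++ " = " ++ pyLJust ((PySem.List.pyGet? value 1).getD "") (padding.getD 1 0)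
      ++ ", /* " ++ (PySem.List.pyGet? value 2).getD "" ++ " */\n")) ""

-- ===== PORT B =====
-- rec(rows) of Source B: returns (w0, w1, render); rows[:mid]/rows[mid:] are List.take/drop,
-- exact here since 0 ≤ mid ≤ len(rows).
def emitRec : List (List String) → Int × Int × (Int → Int → String)
  | [] => (0, 0, fun _ _ => "")
  | [row] =>
    (PySem.Str.len ((PySem.List.pyGet? row 0).getD ""),
     PySem.Str.len ((PySem.List.pyGet? row 1).getD ""),
     fun w0 w1 => "    " ++ pyLJust ((PySem.List.pyGet? row 0).getD "") w0
       ++ " = " ++ pyLJust ((PySem.List.pyGet? row 1).getD "") w1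
       ++ ", /* " ++ (PySem.List.pyGet? row 2).getD "" ++ " */\n")
  | r1 :: r2 :: rest =>
    let mid := (r1 :: r2 :: rest).length / 2
    let L := emitRec ((r1 :: r2 :: rest).take mid)
    let R := emitRec ((r1 :: r2 :: rest).drop mid)
    (max L.1 R.1, max L.2.1 R.2.1, fun w0 w1 => L.2.2 w0 w1 ++ R.2.2 w0 w1)
termination_by l => l.length
decreasing_by
  · simp [List.length_take]; omega
  · simp [List.length_drop]; omega

def emit_enum_alt (data : List (List String)) : String :=
  let res := emitRec data
  res.2.2 res.1 res.2.1

-- ===== PRECONDITION & SPEC =====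
-- Pre_ excludes exactly the inputs where the Python A raises IndexError: a row with fewer
-- than 3 entries (value[2], and for short rows padding[0]/padding[1], are out of range).
def Pre_emit_enum (data : List (List String)) : Prop := ∀ row ∈ data, 3 ≤ row.length
instance (data : List (List String)) : Decidable (Pre_emit_enum data) := by unfold Pre_emit_enum; infer_instance
def pvWitness_emit_enum : List (List String) := [["VAL_A", "0x01", "first"], ["B", "2", "second"]]

def Spec_emit_enum (data : List (List String)) (out : String) : Prop := out = emit_enum_alt data
instance (data : List (List String)) (out : String) : Decidable (Spec_emit_enum data out) := by unfold Spec_emit_enum; infer_instance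

-- ===== CLAIM (what is proved, stated in full; the proofs are below) =====
def Claim_equal_emit_enum : Prop := ∀ (data : List (List String)), Dom_emit_enum data → Pre_emit_enum data → Spec_emit_enum data (emit_enum data)

-- ===== LEMMAS AND PROOFS =====

-- the formatted line for one row, as both ports spell it
def lineStr (row : List String) (w0 w1 : Int) : String :=
  "    " ++ pyLJust ((PySem.List.pyGet? row 0).getD "") w0
    ++ " = " ++ pyLJust ((PySem.List.pyGet? row 1).getD "") w1
    ++ ", /* " ++ (PySem.List.pyGet? row 2).getD "" ++ " */\n"

theorem intercalate_nil_sep (xs : List (List Char)) : List.intercalate [] xs = xs.flatten := by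
  induction xs with
  | nil => rfl
  | cons x t ih =>
    cases t with
    | nil => simp [List.intercalate]
    | cons y ys =>
      simp only [List.intercalate, List.intersperse] at *
      simp [ih]

theorem str_join_empty_cons (x : String) (xs : List String) :
    PySem.Str.join "" (x :: xs) = x ++ PySem.Str.join "" xs := by
  simp [PySem.Str.join, PySem.Chars.join, intercalate_nil_sep]

theorem str_join_empty_append (a b : List String) :
    PySem.Str.join "" (a ++ b) = PySem.Str.join "" a ++ PySem.Str.join "" b := by
  induction a with
  | nil =>
    simp [PySem.Str.join, PySem.Chars.join, intercalate_nil_sep]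
  | cons x t ih =>
    rw [List.cons_append, str_join_empty_cons, str_join_empty_cons, ih, String.append_assoc]

theorem foldl_append_str {α : Type} (l : List α) (g : α → String) :
    ∀ s : String, l.foldl (fun acc x => acc ++ g x) s = s ++ PySem.Str.join "" (l.map g) := by
  induction l with
  | nil => intro s; simp [PySem.Str.join, PySem.Chars.join, List.intercalate]
  | cons x xs ih =>
    intro s
    simp only [List.foldl_cons, List.map_cons, str_join_empty_cons, ih,
      String.append_assoc]

theorem len_nonneg (s : String) : 0 ≤ PySem.Str.len s := by
  simp [PySem.Str.len_eq]

-- ---- max-fold algebra ----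
theorem foldr_max_nonneg (l : List Int) : 0 ≤ l.foldr max 0 := by
  induction l with
  | nil => simp
  | cons a t ih => exact le_trans ih (le_max_right a _)

theorem foldr_max_seed (l : List Int) (s : Int) (hs : 0 ≤ s) :
    l.foldr max s = max (l.foldr max 0) s := by
  induction l with
  | nil => simp [max_eq_right hs]
  | cons a t ih => simp [List.foldr_cons, ih, max_assoc]

theorem foldr_max_append (a b : List Int) :
    (a ++ b).foldr max 0 = max (a.foldr max 0) (b.foldr max 0) := by
  rw [List.foldr_append, foldr_max_seed a _ (foldr_max_nonneg b)]

theorem foldr_max_pull (t : List Int) (s a : Int) :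
    t.foldr max (max s a) = max a (t.foldr max s) := by
  induction t with
  | nil => simp [max_comm]
  | cons b u ih => simp [List.foldr_cons, ih, max_left_comm]

theorem foldl_max_eq_foldr (l : List Int) : ∀ s : Int, l.foldl max s = l.foldr max s := by
  induction l with
  | nil => intro s; rfl
  | cons a t ih =>
    intro s
    rw [List.foldl_cons, ih (max s a), List.foldr_cons, foldr_max_pull]

-- ---- characterisation of emitRec ----
theorem str_join_nil : PySem.Str.join "" [] = "" := by
  simp [PySem.Str.join, PySem.Chars.join, List.intercalate]

theorem str_join_singleton (x : String) : PySem.Str.join "" [x] = x := by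
  rw [str_join_empty_cons, str_join_nil]
  simp

theorem emitRec_nil : emitRec [] = (0, 0, fun _ _ => "") := by
  simp [emitRec]

theorem emitRec_single (row : List String) :
    emitRec [row] =
      (PySem.Str.len ((PySem.List.pyGet? row 0).getD ""),
       PySem.Str.len ((PySem.List.pyGet? row 1).getD ""),
       fun w0 w1 => lineStr row w0 w1) := by
  simp [emitRec, lineStr]

theorem emitRec_cons_cons (r1 r2 : List String) (rest : List (List String)) :
    emitRec (r1 :: r2 :: rest) =
      (let L := emitRec ((r1 :: r2 :: rest).take ((r1 :: r2 :: rest).length / 2))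
       let R := emitRec ((r1 :: r2 :: rest).drop ((r1 :: r2 :: rest).length / 2))
       (max L.1 R.1, max L.2.1 R.2.1, fun w0 w1 => L.2.2 w0 w1 ++ R.2.2 w0 w1)) := by
  rw [emitRec]

theorem emitRec_spec_aux : ∀ (n : Nat) (rows : List (List String)), rows.length ≤ n →
    (emitRec rows).1 =
        (rows.map (fun row => PySem.Str.len ((PySem.List.pyGet? row 0).getD ""))).foldr max 0
    ∧ (emitRec rows).2.1 =
        (rows.map (fun row => PySem.Str.len ((PySem.List.pyGet? row 1).getD ""))).foldr max 0
    ∧ ∀ w0 w1, (emitRec rows).2.2 w0 w1 =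
        PySem.Str.join "" (rows.map (fun row => lineStr row w0 w1)) := by
  intro n
  induction n with
  | zero =>
    intro rows h
    have hr : rows = [] := List.eq_nil_of_length_eq_zero (Nat.le_zero.mp h)
    subst hr
    exact ⟨by simp [emitRec_nil], by simp [emitRec_nil],
      fun w0 w1 => by simp [emitRec_nil, str_join_nil]⟩
  | succ n ih =>
    intro rows h
    match rows with
    | [] =>
      exact ⟨by simp [emitRec_nil], by simp [emitRec_nil],
        fun w0 w1 => by simp [emitRec_nil, str_join_nil]⟩
    | [row] =>
      rw [emitRec_single]
      refine ⟨?_, ?_, fun w0 w1 => ?_⟩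
      · simp only [List.map_cons, List.map_nil, List.foldr_cons, List.foldr_nil]
        exact (max_eq_left (len_nonneg _)).symm
      · simp only [List.map_cons, List.map_nil, List.foldr_cons, List.foldr_nil]
        exact (max_eq_left (len_nonneg _)).symm
      · simp only [List.map_cons, List.map_nil, str_join_singleton]
    | r1 :: r2 :: rest =>
      have hlen : (r1 :: r2 :: rest).length = rest.length + 2 := by simp
      have hT : ((r1 :: r2 :: rest).take ((r1 :: r2 :: rest).length / 2)).length ≤ n := by
        simp only [List.length_take, hlen] at *
        omega
      have hD : ((r1 :: r2 :: rest).drop ((r1 :: r2 :: rest).length / 2)).length ≤ n := by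
        simp only [List.length_drop, hlen] at *
        omega
      obtain ⟨L0, L1, Lr⟩ := ih _ hT
      obtain ⟨R0, R1, Rr⟩ := ih _ hD
      have hsplit := List.take_append_drop ((r1 :: r2 :: rest).length / 2) (r1 :: r2 :: rest)
      rw [emitRec_cons_cons]
      refine ⟨?_, ?_, fun w0 w1 => ?_⟩
      · show max (emitRec _).1 (emitRec _).1 = _
        rw [L0, R0, ← foldr_max_append, ← List.map_append, hsplit]
      · show max (emitRec _).2.1 (emitRec _).2.1 = _
        rw [L1, R1, ← foldr_max_append, ← List.map_append, hsplit]
      · show (emitRec _).2.2 w0 w1 ++ (emitRec _).2.2 w0 w1 = _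
        rw [Lr, Rr, ← str_join_empty_append, ← List.map_append, hsplit]

theorem emitRec_spec (rows : List (List String)) :
    (emitRec rows).1 =
        (rows.map (fun row => PySem.Str.len ((PySem.List.pyGet? row 0).getD ""))).foldr max 0
    ∧ (emitRec rows).2.1 =
        (rows.map (fun row => PySem.Str.len ((PySem.List.pyGet? row 1).getD ""))).foldr max 0
    ∧ ∀ w0 w1, (emitRec rows).2.2 w0 w1 =
        PySem.Str.join "" (rows.map (fun row => lineStr row w0 w1)) :=
  emitRec_spec_aux rows.length rows le_rfl

-- ---- A-side characterisation (sizeFields entrywise) ----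
def stepResults (results : List Int) (c : Nat) (col : String) : List Int :=
  if results.length ≤ c then results ++ [PySem.Str.len col]
  else if results.getD c 0 < PySem.Str.len col then results.set c (PySem.Str.len col)
  else results

theorem sizeFieldsInner_eq_step (col : String) (rest : List String) (results : List Int) (c : Nat) :
    sizeFieldsInner (col :: rest) results c = sizeFieldsInner rest (stepResults results c col) (c + 1) := rfl

theorem getD_nonneg (results : List Int) (h : ∀ x ∈ results, 0 ≤ x) (j : Nat) :
    0 ≤ results.getD j 0 := by
  rcases lt_or_ge j results.length with hj | hj
  · rw [List.getD_eq_getElem _ _ hj]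
    exact h _ (List.getElem_mem hj)
  · rw [List.getD_eq_default _ _ hj]

theorem length_stepResults (results : List Int) (c : Nat) (col : String) (hc : c ≤ results.length) :
    (stepResults results c col).length = max results.length (c + 1) := by
  unfold stepResults
  split_ifs <;> simp <;> omega

theorem mem_stepResults (results : List Int) (c : Nat) (col : String)
    (h : ∀ x ∈ results, 0 ≤ x) : ∀ x ∈ stepResults results c col, 0 ≤ x := by
  unfold stepResults
  split_ifs <;> intro x hx
  · rcases List.mem_append.1 hx with hx | hx
    · exact h x hx
    · simp at hx; subst hx; exact len_nonneg col
  · rcases List.mem_or_eq_of_mem_set hx with hx | hx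
    · exact h x hx
    · subst hx; exact len_nonneg col
  · exact h x hx

theorem getD_stepResults (results : List Int) (c : Nat) (col : String) (hc : c ≤ results.length) (j : Nat) :
    (stepResults results c col).getD j 0 =
      if j = c then max (results.getD j 0) (PySem.Str.len col) else results.getD j 0 := by
  unfold stepResults
  split_ifs with h1 h2 h3 h4 h5
  · have hl : results.length = c := le_antisymm h1 hc
    subst h2
    have hnone : results[j]? = none := List.getElem?_eq_none (by omega)
    rw [List.getD, List.getD, List.getElem?_append_right (by omega), hl, Nat.sub_self, hnone]
    simp
  · rcases lt_or_ge j results.length with h | h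
    · rw [List.getD, List.getD, List.getElem?_append_left h]
    · have hl : results.length = c := le_antisymm h1 hc
      rw [List.getD, List.getD, List.getElem?_append_right h,
        List.getElem?_eq_none (by simp; omega), List.getElem?_eq_none h]
  · subst h4
    have hcl : j < results.length := by omega
    rw [List.getD, List.getD, List.getElem?_set_self hcl]
    have hle : results.getD j 0 ≤ PySem.Str.len col := le_of_lt h3
    rw [List.getD] at hle
    simp [PySem.Str.len_eq] at hle
    simp [max_eq_right hle]
  · rw [List.getD, List.getD, List.getElem?_set_ne (by omega : c ≠ j)]
  · subst h5
    exact (max_eq_left (le_of_not_gt h3)).symm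
  · rfl

theorem sizeFieldsInner_getD (row : List String) :
    ∀ (results : List Int) (c : Nat), c ≤ results.length → (∀ x ∈ results, 0 ≤ x) → ∀ j,
      (sizeFieldsInner row results c).getD j 0 =
        if j < c then results.getD j 0
        else max (results.getD j 0) (PySem.Str.len (row.getD (j - c) "")) := by
  induction row with
  | nil =>
    intro results c _ hnn j
    have h0 : PySem.Str.len ((List.nil (α := String)).getD (j - c) "") = 0 := rfl
    simp only [sizeFieldsInner, h0]
    split_ifs
    · rfl
    · exact (max_eq_left (getD_nonneg results hnn j)).symm
  | cons col rest ih =>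
    intro results c hc hnn j
    rw [sizeFieldsInner_eq_step,
      ih _ (c + 1) (by rw [length_stepResults _ _ _ hc]; omega) (mem_stepResults _ _ _ hnn) j,
      getD_stepResults _ _ _ hc j]
    rcases Nat.lt_trichotomy j c with h | h | h
    · simp only [if_pos h, if_pos (by omega : j < c + 1), if_neg (by omega : ¬ j = c)]
    · subst h
      simp
    · have hsub : j - c = (j - (c + 1)) + 1 := by omega
      simp only [if_neg (by omega : ¬ j < c), if_neg (by omega : ¬ j < c + 1),
        if_neg (by omega : ¬ j = c), hsub, List.getD_cons_succ]

theorem sizeFieldsInner_nonneg (row : List String) :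
    ∀ (results : List Int) (c : Nat), (∀ x ∈ results, 0 ≤ x) →
      ∀ x ∈ sizeFieldsInner row results c, 0 ≤ x := by
  induction row with
  | nil => intro results c h x hx; exact h x hx
  | cons col rest ih =>
    intro results c h x hx
    rw [sizeFieldsInner_eq_step] at hx
    exact ih _ (c + 1) (mem_stepResults _ _ _ h) x hx

theorem sizeFields_fold_getD (data : List (List String)) :
    ∀ (results : List Int) (j : Nat), (∀ x ∈ results, 0 ≤ x) →
      ((data.foldl (fun r row => sizeFieldsInner row r 0) results).getD j 0) =
        (data.map (fun row => PySem.Str.len (row.getD j ""))).foldl max (results.getD j 0) := by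
  induction data with
  | nil => intro results j _; rfl
  | cons row rest ih =>
    intro results j hnn
    rw [List.foldl_cons, ih _ j (sizeFieldsInner_nonneg row results 0 hnn),
      sizeFieldsInner_getD row results 0 (Nat.zero_le _) hnn j]
    simp only [if_neg (Nat.not_lt_zero j), Nat.sub_zero, List.map_cons, List.foldl_cons]

-- widths agree: sizeFields entry j = emitRec's foldr max over the same column lengths
theorem sizeFields_getD_eq (data : List (List String)) (j : Nat) :
    (sizeFields data).getD j 0 =
      (data.map (fun row => PySem.Str.len ((PySem.List.pyGet? row (j : Int)).getD ""))).foldr max 0 := by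
  unfold sizeFields
  rw [sizeFields_fold_getD data [] j (by simp)]
  have h0 : ([] : List Int).getD j 0 = 0 := rfl
  rw [h0, foldl_max_eq_foldr]
  exact congrArg (fun l => List.foldr max 0 l)
    (List.map_congr_left (fun row _ => by
      rw [PySem.List.pyGet?_natCast, List.getD_eq_getElem?_getD]))

-- ===== VERDICT (by name: the statement is the Claim_ definition above) =====
theorem emit_enum_spec : Claim_equal_emit_enum := by
  intro data _ _
  unfold Spec_emit_enum emit_enum emit_enum_alt
  obtain ⟨h0, h1, hr⟩ := emitRec_spec data
  have hA0 : (sizeFields data).getD 0 0 = (emitRec data).1 := by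
    rw [sizeFields_getD_eq data 0, h0]; simp
  have hA1 : (sizeFields data).getD 1 0 = (emitRec data).2.1 := by
    rw [sizeFields_getD_eq data 1, h1]; simp
  rw [foldl_append_str, hr, hA0, hA1]
  simp [lineStr]
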